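-- pv_equiv track=rewrite | github.com/ohbumjun/Algorithm_CodingTest | Algorithm/BOJ/백준강좌/단어수학_0311.py | calc
-- ===== SOURCE A (Python) =====
-- def calc(a, letters, d):
--     # alpha 에 d 관련 문자열 할당하기
--     m = len(letters)
--     sum = 0
--     alpha = dict()
--     for i in range(len(d)):
--         alpha[letters[i]] = d[i]
--     for i in range(len(a)):
--         now = 0
--         for s in a[i]:
--             now = now * 10 + alpha[s]
--         sum += now
--     return sum
-- ===== SOURCE B (Python) =====
-- def calc(a, letters, d):
--     alpha = {}
--     for i in range(len(d)):
--         alpha[letters[i]] = d[i]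
--     # coefficient table: total positional weight of each letter across all words
--     coeff = {}
--     for word in a:
--         p = 1
--         for c in reversed(word):
--             coeff[c] = coeff.get(c, 0) + p
--             p *= 10
--     return sum(alpha[c] * w for c, w in coeff.items())
-- ===== Notes on version B (the rewrite author's own statement) =====
-- stated objective: alternative
-- what changed: Instead of evaluating each word by Horner's rule and summing the word values, B accumulates a per-letter coefficient table (sum of positional powers of 10) in one pass and then computes the answer as a single dot product alpha[c]*coeff[c] over the table.
import Mathlib
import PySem

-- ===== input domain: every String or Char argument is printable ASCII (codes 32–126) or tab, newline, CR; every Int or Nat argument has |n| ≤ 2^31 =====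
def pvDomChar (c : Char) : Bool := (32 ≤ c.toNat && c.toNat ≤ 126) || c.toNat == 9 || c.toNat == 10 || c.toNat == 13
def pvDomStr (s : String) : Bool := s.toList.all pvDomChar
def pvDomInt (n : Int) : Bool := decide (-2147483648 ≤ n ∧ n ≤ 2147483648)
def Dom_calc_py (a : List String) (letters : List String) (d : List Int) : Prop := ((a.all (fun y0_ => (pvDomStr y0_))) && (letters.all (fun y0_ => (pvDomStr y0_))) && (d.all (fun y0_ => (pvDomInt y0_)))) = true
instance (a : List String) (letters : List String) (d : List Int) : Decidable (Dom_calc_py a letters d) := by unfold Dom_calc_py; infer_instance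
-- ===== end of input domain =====

-- B replaces per-word Horner evaluation by a per-letter coefficient table (sum of positional
-- powers of 10), reduced by one dot product with the digit map: an alternative decomposition,
-- same asymptotic cost.

-- ===== PORT A =====
-- 'alpha[letters[i]] = d[i]' loop (shared, verbatim, by both Pythons); lookups use getD — the
-- raising cases (IndexError/KeyError) are excluded by Pre_calc_py below.
def pvAlpha (letters : List String) (d : List Int) : PySem.Dict String Int :=
  (PySem.List.pyRange 0 (d.length : Int) 1).foldl
    (fun al i => al.insert (PySem.List.pyGetD letters i "") (PySem.List.pyGetD d i 0))
    PySem.Dict.empty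

def calc_py (a : List String) (letters : List String) (d : List Int) : Int :=
  let alpha := pvAlpha letters d
  (PySem.List.pyRange 0 (a.length : Int) 1).foldl
    (fun sum i =>
      sum + ((PySem.List.pyGetD a i "").toList.foldl
        (fun now c => now * 10 + alpha.getD (String.mk [c]) 0) 0))
    0

-- ===== PORT B =====
def calc_py_alt (a : List String) (letters : List String) (d : List Int) : Int :=
  let alpha := pvAlpha letters d
  let coeff : PySem.Dict String Int :=
    a.foldl (fun co w =>
      (w.toList.reverse.foldl
        (fun s c => (s.1.insert (String.mk [c]) (s.1.getD (String.mk [c]) 0 + s.2), s.2 * 10))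
        (co, (1 : Int))).1)
      PySem.Dict.empty
  (coeff.items.map (fun kv => alpha.getD kv.1 0 * kv.2)).sum

-- ===== PRECONDITION & SPEC =====
-- Pre_ excludes exactly the inputs where Python A raises: IndexError when len(d) > len(letters),
-- and KeyError when some character of a word is not among the first len(d) letters.
def Pre_calc_py (a : List String) (letters : List String) (d : List Int) : Prop :=
  d.length ≤ letters.length ∧
  (a.all (fun w => w.toList.all (fun c =>
    ((letters.take d.length).map String.toList).contains [c]))) = true
instance (a : List String) (letters : List String) (d : List Int) : Decidable (Pre_calc_py a letters d) := by unfold Pre_calc_py; infer_instance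

def pvWitness_calc_py : List String × List String × List Int := (["AB", "B"], ["A", "B"], [1, 2])

def Spec_calc_py (a : List String) (letters : List String) (d : List Int) (out : Int) : Prop := out = calc_py_alt a letters d
instance (a : List String) (letters : List String) (d : List Int) (out : Int) : Decidable (Spec_calc_py a letters d out) := by unfold Spec_calc_py; infer_instance

-- ===== CLAIM (what is proved, stated in full; the proofs are below) =====
def Claim_equal_calc_py : Prop := ∀ (a : List String) (letters : List String) (d : List Int), Dom_calc_py a letters d → Pre_calc_py a letters d → Spec_calc_py a letters d (calc_py a letters d)

-- ===== LEMMAS AND PROOFS =====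

-- proof-only helpers
def pvDsum (f : String → Int) (dct : PySem.Dict String Int) : Int :=
  (dct.items.map (fun kv => f kv.1 * kv.2)).sum

def pvRsum (f : String → Int) : List Char → Int
  | [] => 0
  | c :: l => f (String.mk [c]) + 10 * pvRsum f l

theorem pvSum_map_replace (f : String → Int) (k : String) (w : Int) :
    ∀ (l : List (String × Int)) (v : Int), (l.map (fun p => p.1)).Nodup → (k, v) ∈ l →
    ((l.map (fun p => if p.1 == k then (k, v + w) else p)).map (fun kv => f kv.1 * kv.2)).sum
      = (l.map (fun kv => f kv.1 * kv.2)).sum + f k * w := by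
  intro l
  induction l with
  | nil => intro v _ hm; cases hm
  | cons p l ih =>
    intro v hnd hm
    rw [List.map_cons, List.nodup_cons] at hnd
    rcases List.mem_cons.mp hm with h | h
    · have hp1 : p.1 = k := by rw [← h]
      have htl : ∀ q ∈ l, (q.1 == k) = false := by
        intro q hq
        simp only [beq_eq_false_iff_ne, ne_eq]
        intro hqk
        exact hnd.1 (by
          rw [hp1, ← hqk]
          exact List.mem_map_of_mem hq)
      have hmap : l.map (fun p => if (p.1 == k) = true then (k, v + w) else p) = l := by
        rw [List.map_congr_left (g := id) ?_, List.map_id]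
        intro q hq; simp [htl q hq]
      rw [← h]
      simp only [List.map_cons, hmap, List.sum_cons]
      simp
      ring
    · have hpk : (p.1 == k) = false := by
        simp only [beq_eq_false_iff_ne, ne_eq]
        intro hpk
        exact hnd.1 (by
          rw [hpk]
          exact List.mem_map_of_mem h)
      simp only [List.map_cons, hpk, Bool.false_eq_true, if_false, List.sum_cons]
      rw [ih v hnd.2 h]
      ring

theorem pvDsum_insert_add (f : String → Int) (dct : PySem.Dict String Int)
    (hnd : dct.keys.Nodup) (k : String) (w : Int) :
    pvDsum f (dct.insert k (dct.getD k 0 + w)) = pvDsum f dct + f k * w := by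
  cases hg : dct.get? k with
  | none =>
    have hc : dct.contains k = false := (PySem.Dict.get?_eq_none_iff_contains dct k).mp hg
    rw [PySem.Dict.getD_of_get?_eq_none dct 0 hg]
    unfold pvDsum
    rw [PySem.Dict.items_insert_of_not_contains _ _ hc]
    simp
  | some v =>
    have hc : dct.contains k = true := by
      rw [PySem.Dict.contains_eq_isSome_get?, hg]; rfl
    have hm : (k, v) ∈ dct.items := PySem.Dict.mem_items_of_get?_eq_some dct hg
    rw [PySem.Dict.getD_of_get?_eq_some dct 0 hg]
    unfold pvDsum
    rw [PySem.Dict.items_insert_of_contains _ _ hc]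
    exact pvSum_map_replace f k w dct.items v hnd hm

theorem pvInner (f : String → Int) :
    ∀ (l : List Char) (co : PySem.Dict String Int) (p : Int), co.keys.Nodup →
    ((l.foldl (fun s c => (s.1.insert (String.mk [c]) (s.1.getD (String.mk [c]) 0 + s.2), s.2 * 10)) (co, p)).1.keys.Nodup
     ∧ pvDsum f (l.foldl (fun s c => (s.1.insert (String.mk [c]) (s.1.getD (String.mk [c]) 0 + s.2), s.2 * 10)) (co, p)).1
        = pvDsum f co + p * pvRsum f l) := by
  intro l
  induction l with
  | nil => intro co p h; simpa [pvRsum] using h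
  | cons c l ih =>
    intro co p h
    simp only [List.foldl_cons]
    have hnd' : (co.insert (String.mk [c]) (co.getD (String.mk [c]) 0 + p)).keys.Nodup :=
      PySem.Dict.nodup_keys_insert _ _ _ h
    obtain ⟨h1, h2⟩ := ih (co.insert (String.mk [c]) (co.getD (String.mk [c]) 0 + p)) (p * 10) hnd'
    refine ⟨h1, ?_⟩
    rw [h2, pvDsum_insert_add f co h, pvRsum]
    ring

theorem pvOuter (f : String → Int) :
    ∀ (a : List String) (co : PySem.Dict String Int), co.keys.Nodup →
    ((a.foldl (fun co w =>
        (w.toList.reverse.foldl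
          (fun s c => (s.1.insert (String.mk [c]) (s.1.getD (String.mk [c]) 0 + s.2), s.2 * 10))
          (co, (1 : Int))).1) co).keys.Nodup
     ∧ pvDsum f (a.foldl (fun co w =>
        (w.toList.reverse.foldl
          (fun s c => (s.1.insert (String.mk [c]) (s.1.getD (String.mk [c]) 0 + s.2), s.2 * 10))
          (co, (1 : Int))).1) co)
        = pvDsum f co + (a.map (fun w => pvRsum f w.toList.reverse)).sum) := by
  intro a
  induction a with
  | nil => intro co h; simpa using h
  | cons w a ih =>
    intro co h
    simp only [List.foldl_cons]
    obtain ⟨hi1, hi2⟩ := pvInner f w.toList.reverse co 1 h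
    obtain ⟨h1, h2⟩ := ih _ hi1
    refine ⟨h1, ?_⟩
    rw [h2, hi2]
    simp [List.sum_cons]
    ring

theorem pvRsum_append (f : String → Int) (l : List Char) (c : Char) :
    pvRsum f (l ++ [c]) = pvRsum f l + 10 ^ l.length * f (String.mk [c]) := by
  induction l with
  | nil => simp [pvRsum]
  | cons x l ih => simp [pvRsum, ih, pow_succ]; ring

theorem pvHorner (f : String → Int) :
    ∀ (l : List Char) (acc : Int),
    l.foldl (fun now c => now * 10 + f (String.mk [c])) acc
      = acc * 10 ^ l.length + pvRsum f l.reverse := by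
  intro l
  induction l with
  | nil => intro acc; simp [pvRsum]
  | cons c l ih =>
    intro acc
    simp only [List.foldl_cons, List.reverse_cons, List.length_cons]
    rw [ih, pvRsum_append, List.length_reverse, pow_succ]
    ring

theorem pvEmpty_dsum (f : String → Int) : pvDsum f PySem.Dict.empty = 0 := by
  simp [pvDsum, PySem.Dict.empty]

-- ===== VERDICT (by name: the statement is the Claim_ definition above) =====
theorem calc_py_spec : Claim_equal_calc_py := by
  intro a letters d _ _
  show calc_py a letters d = calc_py_alt a letters d
  simp only [calc_py, calc_py_alt]
  rw [PySem.List.foldl_pyRange_zero_pyGetD' a ""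
    (fun sum w => sum + w.toList.foldl
      (fun now c => now * 10 + (pvAlpha letters d).getD (String.mk [c]) 0) 0) 0]
  rw [PySem.List.foldl_add (g := fun w : String =>
    w.toList.foldl (fun now c => now * 10 + (pvAlpha letters d).getD (String.mk [c]) 0) 0)]
  obtain ⟨_, h2⟩ := pvOuter (fun k => (pvAlpha letters d).getD k 0) a PySem.Dict.empty
    (PySem.Dict.nodup_keys_empty)
  show 0 + (a.map _).sum = pvDsum (fun k => (pvAlpha letters d).getD k 0) _
  rw [h2, pvEmpty_dsum]
  have hmaps : List.map (fun w : String => w.toList.foldl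
        (fun now c => now * 10 + (pvAlpha letters d).getD (String.mk [c]) 0) 0) a
      = List.map (fun w => pvRsum (fun k => (pvAlpha letters d).getD k 0) w.toList.reverse) a := by
    apply List.map_congr_left
    intro w _
    rw [pvHorner (fun k => (pvAlpha letters d).getD k 0) w.toList 0]
    simp
  rw [hmaps]
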